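-- pv_equiv track=rewrite | github.com/jyscao/gossip-network-example | gossip/server.py | _filter_in_paths
-- ===== SOURCE A (Python) =====
-- def _filter_in_paths(in_paths_ls, paths_type):
--     assert paths_type in {"both", "longest", "shortest", "all"}
--
--     if paths_type == "all":
--         return in_paths_ls
--
--     max_hops = max(len(ps) for ps in in_paths_ls) if paths_type in {"both", "longest"} else None
--     min_hops = min(len(ps) for ps in in_paths_ls) if paths_type in {"both", "shortest"} else None
--
--     if paths_type == "both":
--         return [pl for pl in in_paths_ls if len(pl) in {max_hops, min_hops}]
--     elif paths_type == "longest":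
--         return [pl for pl in in_paths_ls if len(pl) == max_hops]
--     elif paths_type == "shortest":
--         return [pl for pl in in_paths_ls if len(pl) == min_hops]
--     else:
--         raise Exception("this should never be reached!")
-- ===== SOURCE B (Python) =====
-- def _extremes(paths, better):
--     # single pass: track the current extremal hop count and the paths achieving it
--     best, kept = None, []
--     for pl in paths:
--         if best is None or better(len(pl), best):
--             best, kept = len(pl), [pl]
--         elif len(pl) == best:
--             kept.append(pl)
--     return kept
--
--
-- def _filter_in_paths(in_paths_ls, paths_type):
--     assert paths_type in {"both", "longest", "shortest", "all"}
--
--     if paths_type == "all":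
--         return in_paths_ls
--     if paths_type == "longest":
--         return _extremes(in_paths_ls, lambda n, b: n > b)
--     if paths_type == "shortest":
--         return _extremes(in_paths_ls, lambda n, b: n < b)
--     # "both": keep the paths that appear among the single-pass extremes
--     keep = _extremes(in_paths_ls, lambda n, b: n > b) + _extremes(in_paths_ls, lambda n, b: n < b)
--     return [pl for pl in in_paths_ls if pl in keep]
-- ===== Notes on version B (the rewrite author's own statement) =====
-- stated objective: alternative
-- what changed: Replaces compute-the-extremum-then-filter with a single-pass reset/append accumulator (_extremes) that tracks the current extremal hop count and the paths achieving it, never materialising max/min; 'both' is then an input-order membership filter against the two accumulated lists.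
import Mathlib
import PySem

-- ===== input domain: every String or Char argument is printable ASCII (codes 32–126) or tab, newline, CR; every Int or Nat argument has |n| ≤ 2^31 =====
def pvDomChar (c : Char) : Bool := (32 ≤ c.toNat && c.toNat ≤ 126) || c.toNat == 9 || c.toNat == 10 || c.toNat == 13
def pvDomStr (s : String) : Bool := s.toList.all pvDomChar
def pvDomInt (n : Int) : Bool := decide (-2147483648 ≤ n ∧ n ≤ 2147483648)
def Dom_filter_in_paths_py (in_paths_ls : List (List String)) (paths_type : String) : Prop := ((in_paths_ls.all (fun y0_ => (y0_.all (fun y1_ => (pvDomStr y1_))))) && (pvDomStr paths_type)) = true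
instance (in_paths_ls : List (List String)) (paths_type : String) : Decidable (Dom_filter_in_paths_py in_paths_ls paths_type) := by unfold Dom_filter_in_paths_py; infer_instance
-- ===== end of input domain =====

-- B replaces A's compute-the-extremum-then-filter with a single-pass reset/append
-- accumulator tracking the current extremal hop count and the paths achieving it;
-- return-value equivalence is claimed on Pre_.

-- ===== PORT A =====
def filter_in_paths_py (in_paths_ls : List (List String)) (paths_type : String) : List (List String) :=
  if paths_type == "all" then in_paths_ls
  else
    let max_hops : Option Int :=
      if paths_type == "both" || paths_type == "longest" then
        PySem.List.max? (in_paths_ls.map (fun ps => (ps.length : Int))) (fun x => x)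
      else none
    let min_hops : Option Int :=
      if paths_type == "both" || paths_type == "shortest" then
        PySem.List.min? (in_paths_ls.map (fun ps => (ps.length : Int))) (fun x => x)
      else none
    if paths_type == "both" then
      in_paths_ls.filter (fun pl => some (pl.length : Int) == max_hops || some (pl.length : Int) == min_hops)
    else if paths_type == "longest" then
      in_paths_ls.filter (fun pl => some (pl.length : Int) == max_hops)
    else if paths_type == "shortest" then
      in_paths_ls.filter (fun pl => some (pl.length : Int) == min_hops)
    else []  -- unreachable under Pre_ (Python's assert raises before this point)

-- ===== PORT B =====
-- the 'for pl in paths' loop of B's _extremes, state = (best, kept)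
def pvExtGo (better : Int → Int → Bool) : List (List String) → Option Int → List (List String) → List (List String)
  | [], _, kept => kept
  | pl :: rest, best, kept =>
    match best with
    | none => pvExtGo better rest (some (pl.length : Int)) [pl]
    | some b =>
      if better (pl.length : Int) b then pvExtGo better rest (some (pl.length : Int)) [pl]
      else if (pl.length : Int) == b then pvExtGo better rest (some b) (kept ++ [pl])
      else pvExtGo better rest (some b) kept

def pvExtremes (paths : List (List String)) (better : Int → Int → Bool) : List (List String) :=
  pvExtGo better paths none []

def filter_in_paths_py_alt (in_paths_ls : List (List String)) (paths_type : String) : List (List String) :=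
  if paths_type == "all" then in_paths_ls
  else if paths_type == "longest" then pvExtremes in_paths_ls (fun n b => n > b)
  else if paths_type == "shortest" then pvExtremes in_paths_ls (fun n b => n < b)
  else  -- "both" (any other paths_type fails Python's assert, outside Pre_)
    let keep := pvExtremes in_paths_ls (fun n b => n > b) ++ pvExtremes in_paths_ls (fun n b => n < b)
    in_paths_ls.filter (fun pl => keep.contains pl)

-- ===== PRECONDITION & SPEC =====
-- Pre_ excludes exactly the inputs where A raises: a paths_type outside the asserted set
-- (AssertionError) and an empty list with paths_type ≠ "all" (ValueError from max/min of empty).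
def Pre_filter_in_paths_py (in_paths_ls : List (List String)) (paths_type : String) : Prop :=
  (paths_type = "both" ∨ paths_type = "longest" ∨ paths_type = "shortest" ∨ paths_type = "all") ∧
  (paths_type = "all" ∨ in_paths_ls ≠ [])
instance (in_paths_ls : List (List String)) (paths_type : String) : Decidable (Pre_filter_in_paths_py in_paths_ls paths_type) := by unfold Pre_filter_in_paths_py; infer_instance
def pvWitness_filter_in_paths_py : List (List String) × String := ([["a"], ["b", "c"]], "both")

def Spec_filter_in_paths_py (in_paths_ls : List (List String)) (paths_type : String) (out : List (List String)) : Prop := out = filter_in_paths_py_alt in_paths_ls paths_type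
instance (in_paths_ls : List (List String)) (paths_type : String) (out : List (List String)) : Decidable (Spec_filter_in_paths_py in_paths_ls paths_type out) := by unfold Spec_filter_in_paths_py; infer_instance

-- ===== CLAIM (what is proved, stated in full; the proofs are below) =====
def Claim_equal_filter_in_paths_py : Prop := ∀ (in_paths_ls : List (List String)) (paths_type : String), Dom_filter_in_paths_py in_paths_ls paths_type → Pre_filter_in_paths_py in_paths_ls paths_type → Spec_filter_in_paths_py in_paths_ls paths_type (filter_in_paths_py in_paths_ls paths_type)

-- ===== LEMMAS AND PROOFS =====

def pvFMax (b : Int) (xs : List (List String)) : Int :=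
  xs.foldl (fun acc pl => max acc (pl.length : Int)) b

def pvFMin (b : Int) (xs : List (List String)) : Int :=
  xs.foldl (fun acc pl => min acc (pl.length : Int)) b

theorem pv_le_fmax (xs : List (List String)) (b : Int) : b ≤ pvFMax b xs := by
  induction xs generalizing b with
  | nil => simp [pvFMax]
  | cons x t ih =>
    have := ih (max b (x.length : Int))
    simp only [pvFMax, List.foldl_cons] at *
    exact le_trans (le_max_left _ _) this

theorem pv_fmin_le (xs : List (List String)) (b : Int) : pvFMin b xs ≤ b := by
  induction xs generalizing b with
  | nil => simp [pvFMin]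
  | cons x t ih =>
    have := ih (min b (x.length : Int))
    simp only [pvFMin, List.foldl_cons] at *
    exact le_trans this (min_le_left _ _)

theorem pv_extGo_gt (xs : List (List String)) (b : Int) (kept : List (List String)) :
    pvExtGo (fun n b => n > b) xs (some b) kept =
      (if b = pvFMax b xs then kept else []) ++
        xs.filter (fun pl => (pl.length : Int) == pvFMax b xs) := by
  induction xs generalizing b kept with
  | nil => simp [pvExtGo, pvFMax]
  | cons x t ih =>
    have hM : pvFMax b (x :: t) = pvFMax (max b (x.length : Int)) t := by
      simp [pvFMax]
    by_cases hgt : (x.length : Int) > b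
    · have hmx : max b (x.length : Int) = (x.length : Int) := by omega
      rw [show pvExtGo (fun n b => n > b) (x :: t) (some b) kept =
            pvExtGo (fun n b => n > b) t (some (x.length : Int)) [x] from by
          simp [pvExtGo, hgt]]
      rw [ih, hM, hmx, List.filter_cons]
      have hb : ¬ b = pvFMax (x.length : Int) t := by
        have := pv_le_fmax t (x.length : Int); omega
      rw [if_neg hb]
      simp only [beq_iff_eq]
      by_cases hx : (x.length : Int) = pvFMax (x.length : Int) t
      · simp only [if_pos hx]; try simp
      · simp only [if_neg hx]; try simp
    · by_cases heq : (x.length : Int) = b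
      · have hmx : max b (x.length : Int) = b := by omega
        rw [show pvExtGo (fun n b => n > b) (x :: t) (some b) kept =
              pvExtGo (fun n b => n > b) t (some b) (kept ++ [x]) from by
            simp [pvExtGo, heq]]
        rw [ih, hM, hmx, List.filter_cons]
        simp only [heq, beq_iff_eq]
        by_cases hb : b = pvFMax b t
        · simp only [if_pos hb]; try simp
        · simp only [if_neg hb]; try simp
      · have hmx : max b (x.length : Int) = b := by omega
        rw [show pvExtGo (fun n b => n > b) (x :: t) (some b) kept =
              pvExtGo (fun n b => n > b) t (some b) kept from by
            simp [pvExtGo, hgt, heq]]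
        rw [ih, hM, hmx, List.filter_cons]
        have hxne : ¬ ((x.length : Int) = pvFMax b t) := by
          have := pv_le_fmax t b; omega
        simp [hxne]

theorem pv_extGo_lt (xs : List (List String)) (b : Int) (kept : List (List String)) :
    pvExtGo (fun n b => n < b) xs (some b) kept =
      (if b = pvFMin b xs then kept else []) ++
        xs.filter (fun pl => (pl.length : Int) == pvFMin b xs) := by
  induction xs generalizing b kept with
  | nil => simp [pvExtGo, pvFMin]
  | cons x t ih =>
    have hM : pvFMin b (x :: t) = pvFMin (min b (x.length : Int)) t := by
      simp [pvFMin]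
    by_cases hgt : (x.length : Int) < b
    · have hmx : min b (x.length : Int) = (x.length : Int) := by omega
      rw [show pvExtGo (fun n b => n < b) (x :: t) (some b) kept =
            pvExtGo (fun n b => n < b) t (some (x.length : Int)) [x] from by
          simp [pvExtGo, hgt]]
      rw [ih, hM, hmx, List.filter_cons]
      have hb : ¬ b = pvFMin (x.length : Int) t := by
        have := pv_fmin_le t (x.length : Int); omega
      rw [if_neg hb]
      simp only [beq_iff_eq]
      by_cases hx : (x.length : Int) = pvFMin (x.length : Int) t
      · simp only [if_pos hx]; try simp
      · simp only [if_neg hx]; try simp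
    · by_cases heq : (x.length : Int) = b
      · have hmx : min b (x.length : Int) = b := by omega
        rw [show pvExtGo (fun n b => n < b) (x :: t) (some b) kept =
              pvExtGo (fun n b => n < b) t (some b) (kept ++ [x]) from by
            simp [pvExtGo, heq]]
        rw [ih, hM, hmx, List.filter_cons]
        simp only [heq, beq_iff_eq]
        by_cases hb : b = pvFMin b t
        · simp only [if_pos hb]; try simp
        · simp only [if_neg hb]; try simp
      · have hmx : min b (x.length : Int) = b := by omega
        rw [show pvExtGo (fun n b => n < b) (x :: t) (some b) kept =
              pvExtGo (fun n b => n < b) t (some b) kept from by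
            simp [pvExtGo, hgt, heq]]
        rw [ih, hM, hmx, List.filter_cons]
        have hxne : ¬ ((x.length : Int) = pvFMin b t) := by
          have := pv_fmin_le t b; omega
        simp [hxne]

-- the single-pass extremes loop computes exactly "filter by the extremal length"
theorem pv_extremes_gt (x : List String) (t : List (List String)) :
    pvExtremes (x :: t) (fun n b => n > b) =
      (x :: t).filter (fun pl => (pl.length : Int) == pvFMax (x.length : Int) t) := by
  unfold pvExtremes
  simp only [pvExtGo, pv_extGo_gt]
  have hle := pv_le_fmax t (x.length : Int)
  simp only [List.filter_cons]
  by_cases hx : (x.length : Int) = pvFMax (x.length : Int) t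
  · simp [← hx]
  · simp [hx]

theorem pv_extremes_lt (x : List String) (t : List (List String)) :
    pvExtremes (x :: t) (fun n b => n < b) =
      (x :: t).filter (fun pl => (pl.length : Int) == pvFMin (x.length : Int) t) := by
  unfold pvExtremes
  simp only [pvExtGo, pv_extGo_lt]
  have hle := pv_fmin_le t (x.length : Int)
  simp only [List.filter_cons]
  by_cases hx : (x.length : Int) = pvFMin (x.length : Int) t
  · simp [← hx]
  · simp [hx]

theorem pv_max_id_eq (x : List String) (t : List (List String)) :
    PySem.List.max? ((x :: t).map (fun ps => (ps.length : Int))) (fun y => y) =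
      some (pvFMax (x.length : Int) t) := by
  rw [List.map_cons, PySem.List.max?_id_cons]
  simp [pvFMax, List.foldl_map]

theorem pv_min_id_eq (x : List String) (t : List (List String)) :
    PySem.List.min? ((x :: t).map (fun ps => (ps.length : Int))) (fun y => y) =
      some (pvFMin (x.length : Int) t) := by
  rw [List.map_cons, PySem.List.min?_id_cons]
  simp [pvFMin, List.foldl_map]

-- ===== VERDICT (by name: the statement is the Claim_ definition above) =====
theorem filter_in_paths_py_spec : Claim_equal_filter_in_paths_py := by
  intro l t _ hpre
  obtain ⟨ht, hne⟩ := hpre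
  unfold Spec_filter_in_paths_py filter_in_paths_py filter_in_paths_py_alt
  rcases ht with rfl | rfl | rfl | rfl
  · -- "both"
    have hne' : l ≠ [] := by
      rcases hne with h | h
      · exact absurd h (by decide)
      · exact h
    rcases l with _ | ⟨x, xs⟩
    · exact absurd rfl hne'
    · simp only [String.reduceBEq, Bool.false_eq_true, Bool.or_false, if_true, if_false,
        pv_max_id_eq, pv_min_id_eq, pv_extremes_gt, pv_extremes_lt]
      apply List.filter_congr
      intro pl hpl
      simp only [List.contains_eq_mem, List.mem_append, List.mem_filter]
      rw [Bool.eq_iff_iff]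
      simp [hpl]
  · -- "longest"
    have hne' : l ≠ [] := by
      rcases hne with h | h
      · exact absurd h (by decide)
      · exact h
    rcases l with _ | ⟨x, xs⟩
    · exact absurd rfl hne'
    · simp only [String.reduceBEq, Bool.false_eq_true, Bool.false_or, Bool.or_false,
        if_true, if_false, pv_max_id_eq, pv_extremes_gt]
      apply List.filter_congr
      intro pl _
      simp
  · -- "shortest"
    have hne' : l ≠ [] := by
      rcases hne with h | h
      · exact absurd h (by decide)
      · exact h
    rcases l with _ | ⟨x, xs⟩
    · exact absurd rfl hne'
    · simp only [String.reduceBEq, Bool.false_eq_true, Bool.false_or, Bool.or_false,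
        if_true, if_false, pv_min_id_eq, pv_extremes_lt]
      apply List.filter_congr
      intro pl _
      simp
  · -- "all"
    simp
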